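-- pv_equiv track=rewrite | github.com/Mirage995/shard-v1 | backend/d2_analyze.py | progressive_degradation
-- ===== SOURCE A (Python) =====
-- def progressive_degradation(perf: dict) -> bool:
--     """True if BOTH arms have monotonic non-improvement across pairs."""
--     a = perf["aggregate"].get("trend_a_certs", [])
--     b = perf["aggregate"].get("trend_b_certs", [])
--     if len(a) < 2 or len(b) < 2:
--         return False
--     a_decay = all(a[i] <= a[i-1] for i in range(1, len(a)))
--     b_decay = all(b[i] <= b[i-1] for i in range(1, len(b)))
--     return a_decay and b_decay
-- ===== SOURCE B (Python) =====
-- def progressive_degradation(perf: dict) -> bool: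
--     """True if BOTH arms have monotonic non-improvement across pairs."""
--     a = perf["aggregate"].get("trend_a_certs", [])
--     b = perf["aggregate"].get("trend_b_certs", [])
--     if len(a) < 2 or len(b) < 2:
--         return False
--     return a == sorted(a, reverse=True) and b == sorted(b, reverse=True)
-- ===== Notes on version B (the rewrite author's own statement) =====
-- stated objective: simpler
-- what changed: Each all(...) adjacent-pair scan is replaced by comparing the list to its descending-sorted copy (a == sorted(a, reverse=True)), a sort-and-compare strategy instead of index arithmetic.
import Mathlib
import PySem

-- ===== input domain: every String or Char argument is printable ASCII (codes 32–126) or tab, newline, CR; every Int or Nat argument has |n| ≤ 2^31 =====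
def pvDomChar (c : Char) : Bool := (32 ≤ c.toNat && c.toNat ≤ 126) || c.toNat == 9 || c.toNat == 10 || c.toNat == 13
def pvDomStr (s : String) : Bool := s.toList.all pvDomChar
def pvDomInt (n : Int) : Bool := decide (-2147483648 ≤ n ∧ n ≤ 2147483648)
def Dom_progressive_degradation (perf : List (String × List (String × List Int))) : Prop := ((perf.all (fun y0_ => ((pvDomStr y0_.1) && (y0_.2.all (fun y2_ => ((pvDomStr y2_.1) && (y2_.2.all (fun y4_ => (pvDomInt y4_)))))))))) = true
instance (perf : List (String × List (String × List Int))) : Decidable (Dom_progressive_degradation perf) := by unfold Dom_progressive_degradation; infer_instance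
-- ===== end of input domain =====

-- B replaces each all(...) adjacent-pair scan by comparing the list with its
-- descending-sorted copy (sort-and-compare); objective: simpler.

-- first-match association-list lookup (Python dict lookup on the encoded dict)
def pvALGet? {α : Type} (d : List (String × α)) (k : String) : Option α :=
  match d with
  | [] => none
  | (k', v) :: t => if k' = k then some v else pvALGet? t k

-- ===== PORT A =====
-- all(xs[i] <= xs[i-1] for i in range(1, len(xs)))
def pvDecayScan (xs : List Int) : Bool :=
  (PySem.List.pyRange 1 xs.length 1).all fun i =>
    match PySem.List.pyGet? xs i, PySem.List.pyGet? xs (i - 1) with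
    | some x, some y => decide (x ≤ y)
    | _, _ => false

def progressive_degradation (perf : List (String × List (String × List Int))) : Bool :=
  match pvALGet? perf "aggregate" with
  | none => false   -- unreachable under Pre_ (Python raises KeyError here)
  | some agg =>
    let a := (pvALGet? agg "trend_a_certs").getD []
    let b := (pvALGet? agg "trend_b_certs").getD []
    if a.length < 2 || b.length < 2 then false
    else
      let a_decay := pvDecayScan a
      let b_decay := pvDecayScan b
      a_decay && b_decay

-- ===== PORT B =====
def progressive_degradation_alt (perf : List (String × List (String × List Int))) : Bool :=
  match pvALGet? perf "aggregate" with
  | none => false   -- unreachable under Pre_ (Python raises KeyError here)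
  | some agg =>
    let a := (pvALGet? agg "trend_a_certs").getD []
    let b := (pvALGet? agg "trend_b_certs").getD []
    if a.length < 2 || b.length < 2 then false
    else decide (a = PySem.List.sorted a (fun x => x) true)
         && decide (b = PySem.List.sorted b (fun x => x) true)

-- ===== PRECONDITION & SPEC =====
-- Pre_ excludes only the inputs on which Python A raises KeyError: no "aggregate" key.
def Pre_progressive_degradation (perf : List (String × List (String × List Int))) : Prop :=
  "aggregate" ∈ perf.map Prod.fst
instance (perf : List (String × List (String × List Int))) : Decidable (Pre_progressive_degradation perf) := by unfold Pre_progressive_degradation; infer_instance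
def pvWitness_progressive_degradation : (List (String × List (String × List Int))) :=
  [("aggregate", [("trend_a_certs", [3, 2]), ("trend_b_certs", [2, 2])])]

def Spec_progressive_degradation (perf : List (String × List (String × List Int))) (out : Bool) : Prop := out = progressive_degradation_alt perf
instance (perf : List (String × List (String × List Int))) (out : Bool) : Decidable (Spec_progressive_degradation perf out) := by unfold Spec_progressive_degradation; infer_instance

-- ===== CLAIM (what is proved, stated in full; the proofs are below) =====
def Claim_equal_progressive_degradation : Prop := ∀ (perf : List (String × List (String × List Int))), Dom_progressive_degradation perf → Pre_progressive_degradation perf → Spec_progressive_degradation perf (progressive_degradation perf)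

-- ===== LEMMAS AND PROOFS =====

lemma pvDecayScan_iff_chain (xs : List Int) :
    pvDecayScan xs = true ↔ xs.IsChain (fun x y => y ≤ x) := by
  rw [List.isChain_iff_getElem]
  unfold pvDecayScan
  rw [List.all_eq_true]
  constructor
  · intro h i hi
    have hm : ((i : Int) + 1) ∈ PySem.List.pyRange 1 xs.length 1 := by
      rw [PySem.List.mem_pyRange_one]; omega
    have := h _ hm
    have h1 : PySem.List.pyGet? xs ((i : Int) + 1) = some xs[i + 1] := by
      rw [show ((i : Int) + 1) = ((i + 1 : Nat) : Int) by push_cast; ring,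
        PySem.List.pyGet?_natCast, List.getElem?_eq_getElem hi]
    have h2 : PySem.List.pyGet? xs ((i : Int) + 1 - 1) = some xs[i] := by
      rw [show ((i : Int) + 1 - 1) = ((i : Nat) : Int) by ring,
        PySem.List.pyGet?_natCast, List.getElem?_eq_getElem (by omega)]
    rw [h1, h2] at this
    simpa using this
  · intro h i hm
    rw [PySem.List.mem_pyRange_one] at hm
    obtain ⟨j, hj⟩ : ∃ j : Nat, i = (j : Int) + 1 := ⟨(i - 1).toNat, by omega⟩
    subst hj
    have hi : j + 1 < xs.length := by omega
    have h1 : PySem.List.pyGet? xs ((j : Int) + 1) = some xs[j + 1] := by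
      rw [show ((j : Int) + 1) = ((j + 1 : Nat) : Int) by push_cast; ring,
        PySem.List.pyGet?_natCast, List.getElem?_eq_getElem hi]
    have h2 : PySem.List.pyGet? xs ((j : Int) + 1 - 1) = some xs[j] := by
      rw [show ((j : Int) + 1 - 1) = ((j : Nat) : Int) by ring,
        PySem.List.pyGet?_natCast, List.getElem?_eq_getElem (by omega)]
    rw [h1, h2]
    simpa using h j hi

lemma pvDecayScan_eq_sorted_cmp (xs : List Int) :
    pvDecayScan xs = decide (xs = PySem.List.sorted xs (fun x => x) true) := by
  rw [Bool.eq_iff_iff, pvDecayScan_iff_chain, decide_eq_true_iff,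
    List.isChain_iff_pairwise]
  constructor
  · intro h
    exact (PySem.List.sorted_rev_eq_self_of_pairwise xs (fun x => x) h).symm
  · intro h
    have := PySem.List.sorted_pairwise_rev xs (fun x => x)
    rw [← h] at this
    exact this

-- ===== VERDICT (by name: the statement is the Claim_ definition above) =====
theorem progressive_degradation_spec : Claim_equal_progressive_degradation := by
  intro perf _ _
  unfold Spec_progressive_degradation progressive_degradation progressive_degradation_alt
  cases pvALGet? perf "aggregate" with
  | none => rfl
  | some agg =>
    simp only
    split
    · rfl
    · rw [pvDecayScan_eq_sorted_cmp, pvDecayScan_eq_sorted_cmp]
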